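-- pv_equiv track=rewrite | github.com/jkrejcichnova/kb4b_prog | jkrej_reseni/ML_apartments.py | num_to_interval
-- ===== SOURCE A (Python) =====
-- def num_to_interval(n) -> int:
--     interval = 200
--     i: int = 0
--     while n > interval:
--         if i == 10:
--             return i
--         n -= interval
--         i += 1
--     return i
-- ===== SOURCE B (Python) =====
-- def num_to_interval(n) -> int:
--     return min(max((n - 1) // 200, 0), 10)
-- ===== Notes on version B (the rewrite author's own statement) =====
-- stated objective: simpler
-- what changed: Replaced the repeated-subtraction while loop (at most 11 iterations) by a single closed-form floor-division expression min(max((n - 1) // 200, 0), 10).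
import Mathlib
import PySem

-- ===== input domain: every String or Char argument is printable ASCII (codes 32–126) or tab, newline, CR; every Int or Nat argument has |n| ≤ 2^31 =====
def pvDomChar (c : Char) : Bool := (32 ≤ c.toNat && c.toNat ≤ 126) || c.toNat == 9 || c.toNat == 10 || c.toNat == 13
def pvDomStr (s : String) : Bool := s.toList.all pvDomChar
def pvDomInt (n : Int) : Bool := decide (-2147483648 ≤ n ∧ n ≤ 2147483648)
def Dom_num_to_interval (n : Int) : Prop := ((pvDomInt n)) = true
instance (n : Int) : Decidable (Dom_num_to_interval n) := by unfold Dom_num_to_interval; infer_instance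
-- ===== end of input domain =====

-- B replaces A's repeated-subtraction loop with a closed-form min/max floor-division formula (simpler).

-- ===== PORT A =====
-- the while loop of A: state (n, i); terminates since n decreases by 200 while n > 200
def numLoopA (n i : Int) : Int :=
  if _h : n > 200 then
    if i = 10 then i
    else numLoopA (n - 200) (i + 1)
  else i
termination_by n.toNat
decreasing_by omega

def num_to_interval (n : Int) : Int := numLoopA n 0

-- ===== PORT B =====
def num_to_interval_alt (n : Int) : Int := min (max (PySem.Int.floordiv (n - 1) 200) 0) 10

-- ===== PRECONDITION & SPEC =====
def Spec_num_to_interval (n : Int) (out : Int) : Prop := out = num_to_interval_alt n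
instance (n : Int) (out : Int) : Decidable (Spec_num_to_interval n out) := by unfold Spec_num_to_interval; infer_instance

-- ===== CLAIM (what is proved, stated in full; the proofs are below) =====
def Claim_equal_num_to_interval : Prop := ∀ (n : Int), Dom_num_to_interval n → Spec_num_to_interval n (num_to_interval n)

-- ===== LEMMAS AND PROOFS =====
-- loop invariant: for 0 ≤ i ≤ 10 the loop computes min (max ((n-1).fdiv 200 + i) i) 10
theorem numLoopA_eq (n i : Int) (h0 : 0 ≤ i) (h10 : i ≤ 10) :
    numLoopA n i = min (max ((n - 1) / 200 + i) i) 10 := by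
  revert h0 h10
  induction n, i using numLoopA.induct with
  | case1 n hgt =>
    intro _ _
    rw [numLoopA, dif_pos hgt, if_pos rfl]
    have : (1:Int) ≤ (n - 1) / 200 := by omega
    omega
  | case2 n i hgt hne ih =>
    intro h0 h10
    rw [numLoopA, dif_pos hgt, if_neg hne]
    rw [ih (by omega) (by omega)]
    have h2 : (n - 200 - 1) / 200 = (n - 1) / 200 - 1 := by omega
    have h1 : (1:Int) ≤ (n - 1) / 200 := by omega
    omega
  | case3 n i hle =>
    intro h0 h10
    rw [numLoopA, dif_neg hle]
    have : (n - 1) / 200 ≤ 0 := by omega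
    omega
-- ===== VERDICT (by name: the statement is the Claim_ definition above) =====
theorem num_to_interval_spec : Claim_equal_num_to_interval := by
  intro n _
  show num_to_interval n = num_to_interval_alt n
  unfold num_to_interval num_to_interval_alt
  rw [PySem.Int.floordiv_eq_ediv_of_pos (by omega), numLoopA_eq n 0 (by omega) (by omega)]
  omega
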